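-- pv_equiv track=rewrite | github.com/tlkvstepan/event_stereo_ICCV2019 | tools/convert_mvsec.py | _find_first_and_last_event_bags_indices
-- ===== SOURCE A (Python) =====
-- def _find_first_and_last_event_bags_indices(event_bag_timestamps,
--                                             start_timestamp, end_timestamp):
--     number_of_bags = len(event_bag_timestamps)
--     for first_bag_index in range(number_of_bags - 1, -1, -1):
--         if event_bag_timestamps[first_bag_index] < start_timestamp:
--             break
--     # Note we search for events in bag in [first_bag_index, last_bag_index).
--     for last_bag_index in range(first_bag_index, number_of_bags):
--         if event_bag_timestamps[last_bag_index] > end_timestamp: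
--             break
--     return first_bag_index, last_bag_index
-- ===== SOURCE B (Python) =====
-- def _find_first_and_last_event_bags_indices(event_bag_timestamps,
--                                             start_timestamp, end_timestamp):
--     number_of_bags = len(event_bag_timestamps)
--     first_bag_index = 0
--     for index, timestamp in enumerate(event_bag_timestamps):
--         if timestamp < start_timestamp:
--             first_bag_index = index
--     last_bag_index = number_of_bags - 1
--     for index in range(number_of_bags - 1, first_bag_index - 1, -1):
--         if event_bag_timestamps[index] > end_timestamp:
--             last_bag_index = index
--     return first_bag_index, last_bag_index
-- ===== Notes on version B (the rewrite author's own statement) =====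
-- stated objective: alternative
-- what changed: A uses two break-out scans (backward for the first index, then forward from it) relying on Python's leftover loop variable; B makes two accumulator passes in the opposite directions (forward over enumerate keeping the last index with timestamp < start, then backward keeping the smallest index with timestamp > end), with no break and no reliance on loop-variable leakage, and returns (0, -1) instead of raising UnboundLocalError on an empty list.
-- crash fix: On an empty timestamp list A raises UnboundLocalError (the loop variable is never bound); B returns (0, -1), the empty interval [0, -1). — e.g. on _find_first_and_last_event_bags_indices([], 0, 0): A raises UnboundLocalError, B returns [0, -1]
import Mathlib
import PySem

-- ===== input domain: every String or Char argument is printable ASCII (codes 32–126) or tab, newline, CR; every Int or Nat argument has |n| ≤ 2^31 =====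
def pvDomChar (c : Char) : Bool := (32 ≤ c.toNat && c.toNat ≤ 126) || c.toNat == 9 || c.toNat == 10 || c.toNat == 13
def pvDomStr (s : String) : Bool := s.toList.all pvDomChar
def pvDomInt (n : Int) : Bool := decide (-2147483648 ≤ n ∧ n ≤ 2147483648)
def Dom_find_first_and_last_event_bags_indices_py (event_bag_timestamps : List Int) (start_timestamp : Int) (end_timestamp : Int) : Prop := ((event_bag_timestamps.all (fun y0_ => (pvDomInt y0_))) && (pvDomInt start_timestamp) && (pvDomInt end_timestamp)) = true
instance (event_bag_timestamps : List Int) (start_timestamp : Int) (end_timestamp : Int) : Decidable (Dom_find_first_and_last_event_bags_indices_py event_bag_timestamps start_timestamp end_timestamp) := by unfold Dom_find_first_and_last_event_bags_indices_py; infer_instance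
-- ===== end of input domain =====

-- B replaces A's two break-out scans (which rely on Python's leftover loop variable) by two
-- accumulator passes in the opposite traversal directions; objective: alternative (same cost).

-- ===== PORT A =====
-- Python `for v in idxs: if p v: break` followed by reading v: v is the first element satisfying
-- p, else the last element of idxs, else (idxs empty) the previous binding d (unbound in Python;
-- only reachable outside Pre_).
def pvLoopVar (p : Int → Prop) [DecidablePred p] : List Int → Int → Int
  | [], d => d
  | i :: rest, _ => if p i then i else pvLoopVar p rest i

def find_first_and_last_event_bags_indices_py (event_bag_timestamps : List Int) (start_timestamp : Int) (end_timestamp : Int) : List Int :=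
  let number_of_bags : Int := event_bag_timestamps.length
  -- ts[i]: index always within range on the ranges scanned, so pyGetD's default is never used
  let first_bag_index :=
    pvLoopVar (fun i => PySem.List.pyGetD event_bag_timestamps i 0 < start_timestamp)
      (PySem.List.pyRange (number_of_bags - 1) (-1) (-1)) 0
  let last_bag_index :=
    pvLoopVar (fun j => PySem.List.pyGetD event_bag_timestamps j 0 > end_timestamp)
      (PySem.List.pyRange first_bag_index number_of_bags 1) 0
  [first_bag_index, last_bag_index]

-- ===== PORT B =====
def find_first_and_last_event_bags_indices_py_alt (event_bag_timestamps : List Int) (start_timestamp : Int) (end_timestamp : Int) : List Int :=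
  let number_of_bags : Int := event_bag_timestamps.length
  let first_bag_index :=
    (PySem.List.enumerate event_bag_timestamps 0).foldl
      (fun acc it => if it.2 < start_timestamp then it.1 else acc) 0
  let last_bag_index :=
    (PySem.List.pyRange (number_of_bags - 1) (first_bag_index - 1) (-1)).foldl
      (fun acc j => if PySem.List.pyGetD event_bag_timestamps j 0 > end_timestamp then j else acc)
      (number_of_bags - 1)
  [first_bag_index, last_bag_index]

-- ===== PRECONDITION & SPEC =====
-- A raises UnboundLocalError on the empty list (the first loop never binds its variable).
def Pre_find_first_and_last_event_bags_indices_py (event_bag_timestamps : List Int) (start_timestamp : Int) (end_timestamp : Int) : Prop := event_bag_timestamps ≠ []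
instance (event_bag_timestamps : List Int) (start_timestamp : Int) (end_timestamp : Int) : Decidable (Pre_find_first_and_last_event_bags_indices_py event_bag_timestamps start_timestamp end_timestamp) := by unfold Pre_find_first_and_last_event_bags_indices_py; infer_instance

def pvWitness_find_first_and_last_event_bags_indices_py : List Int × Int × Int := ([3, 7, 9], 5, 8)

-- On an empty timestamp list A raises UnboundLocalError; B returns (0, -1), the empty interval [0, -1).
def Raises_find_first_and_last_event_bags_indices_py (event_bag_timestamps : List Int) (start_timestamp : Int) (end_timestamp : Int) : Prop := event_bag_timestamps = []
instance (event_bag_timestamps : List Int) (start_timestamp : Int) (end_timestamp : Int) : Decidable (Raises_find_first_and_last_event_bags_indices_py event_bag_timestamps start_timestamp end_timestamp) := by unfold Raises_find_first_and_last_event_bags_indices_py; infer_instance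
def pvRaiseWitness_find_first_and_last_event_bags_indices_py : List Int × Int × Int := ([], 0, 0)
def pvRaiseWitnessOut_find_first_and_last_event_bags_indices_py : List Int := [0, -1]

def Spec_find_first_and_last_event_bags_indices_py (event_bag_timestamps : List Int) (start_timestamp : Int) (end_timestamp : Int) (out : List Int) : Prop := out = find_first_and_last_event_bags_indices_py_alt event_bag_timestamps start_timestamp end_timestamp
instance (event_bag_timestamps : List Int) (start_timestamp : Int) (end_timestamp : Int) (out : List Int) : Decidable (Spec_find_first_and_last_event_bags_indices_py event_bag_timestamps start_timestamp end_timestamp out) := by unfold Spec_find_first_and_last_event_bags_indices_py; infer_instance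

-- ===== CLAIM (what is proved, stated in full; the proofs are below) =====
def Claim_equal_find_first_and_last_event_bags_indices_py : Prop := ∀ (event_bag_timestamps : List Int) (start_timestamp : Int) (end_timestamp : Int), Dom_find_first_and_last_event_bags_indices_py event_bag_timestamps start_timestamp end_timestamp → Pre_find_first_and_last_event_bags_indices_py event_bag_timestamps start_timestamp end_timestamp → Spec_find_first_and_last_event_bags_indices_py event_bag_timestamps start_timestamp end_timestamp (find_first_and_last_event_bags_indices_py event_bag_timestamps start_timestamp end_timestamp)

def Claim_raises_find_first_and_last_event_bags_indices_py : Prop := (∀ (event_bag_timestamps : List Int) (start_timestamp : Int) (end_timestamp : Int), Dom_find_first_and_last_event_bags_indices_py event_bag_timestamps start_timestamp end_timestamp → Raises_find_first_and_last_event_bags_indices_py event_bag_timestamps start_timestamp end_timestamp → ¬ Pre_find_first_and_last_event_bags_indices_py event_bag_timestamps start_timestamp end_timestamp) ∧ (Dom_find_first_and_last_event_bags_indices_py (pvRaiseWitness_find_first_and_last_event_bags_indices_py.1) (pvRaiseWitness_find_first_and_last_event_bags_indices_py.2.1) (pvRaiseWitness_find_first_and_last_event_bags_indices_py.2.2) ∧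 Raises_find_first_and_last_event_bags_indices_py (pvRaiseWitness_find_first_and_last_event_bags_indices_py.1) (pvRaiseWitness_find_first_and_last_event_bags_indices_py.2.1) (pvRaiseWitness_find_first_and_last_event_bags_indices_py.2.2) ∧ find_first_and_last_event_bags_indices_py_alt (pvRaiseWitness_find_first_and_last_event_bags_indices_py.1) (pvRaiseWitness_find_first_and_last_event_bags_indices_py.2.1) (pvRaiseWitness_find_first_and_last_event_bags_indices_py.2.2) = pvRaiseWitnessOut_find_first_and_last_event_bags_indices_py)

-- ===== LEMMAS AND PROOFS =====

lemma pv_loopVar_eq (p : Int → Prop) [DecidablePred p] :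
    ∀ (l : List Int) (d lastv : Int), l.getLast? = some lastv →
      pvLoopVar p l d = ((l.find? (fun x => decide (p x))).getD lastv)
  | [], _, _, h => by simp at h
  | i :: rest, d, lastv, h => by
      cases rest with
      | nil =>
          simp only [List.getLast?_singleton, Option.some.injEq] at h
          subst h
          by_cases hp : p i <;> simp [pvLoopVar, List.find?, hp]
      | cons j rest' =>
          have hlast : (j :: rest').getLast? = some lastv := by
            simpa [List.getLast?_cons_cons] using h
          by_cases hp : p i
          · simp [pvLoopVar, List.find?, hp]
          · have ih := pv_loopVar_eq p (j :: rest') i lastv hlast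
            have hstep : pvLoopVar p (i :: j :: rest') d = pvLoopVar p (j :: rest') i := by
              simp [pvLoopVar, hp]
            rw [hstep, ih]
            simp [List.find?, hp]

lemma pv_foldl_pick (p : Int → Prop) [DecidablePred p] :
    ∀ (l : List Int) (d : Int),
      l.foldl (fun acc x => if p x then x else acc) d
        = ((l.reverse.find? (fun x => decide (p x))).getD d)
  | [], d => by simp
  | x :: l, d => by
      have ih := pv_foldl_pick p l (if p x then x else d)
      simp only [List.foldl_cons, List.reverse_cons, List.find?_append, ih]
      cases hfind : l.reverse.find? (fun x => decide (p x)) with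
      | some v => simp
      | none => by_cases hp : p x <;> simp [List.find?, hp]

lemma pv_getLast?_pyRange_one (a b : Int) (h : a < b) :
    (PySem.List.pyRange a b 1).getLast? = some (b - 1) := by
  rw [← List.head?_reverse]
  have hrev : (PySem.List.pyRange a b 1).reverse = PySem.List.pyRange (b - 1) (a - 1) (-1) := by
    have := PySem.List.pyRange_neg_one_eq_reverse (b - 1) (a - 1)
    simp only [sub_add_cancel] at this
    rw [this]
  rw [hrev, PySem.List.pyRange_neg_one_cons (by omega)]
  rfl

lemma pv_main_eq (ts : List Int) (s e : Int) (h : ts ≠ []) :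
    find_first_and_last_event_bags_indices_py ts s e
      = find_first_and_last_event_bags_indices_py_alt ts s e := by
  have hn : 0 < (ts.length : Int) := by
    have := List.length_pos_iff.mpr h
    exact_mod_cast this
  unfold find_first_and_last_event_bags_indices_py find_first_and_last_event_bags_indices_py_alt
  simp only []
  set n : Int := (ts.length : Int) with hn_def
  -- first index: A's backward break-scan = B's forward accumulator pass
  have hRrev : PySem.List.pyRange (n - 1) (-1) (-1) = (PySem.List.pyRange 0 n 1).reverse := by
    have := PySem.List.pyRange_neg_one_eq_reverse (n - 1) (-1)
    simpa using this
  have hAfirst :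
      pvLoopVar (fun i => PySem.List.pyGetD ts i 0 < s) (PySem.List.pyRange (n - 1) (-1) (-1)) 0
        = (((PySem.List.pyRange 0 n 1).reverse.find?
            (fun i => decide (PySem.List.pyGetD ts i 0 < s))).getD 0) := by
    rw [hRrev]
    apply pv_loopVar_eq
    rw [List.getLast?_reverse]
    rw [PySem.List.pyRange_one_cons (by omega)]
    rfl
  have hBfirst :
      (PySem.List.enumerate ts 0).foldl (fun acc it => if it.2 < s then it.1 else acc) 0
        = (((PySem.List.pyRange 0 n 1).reverse.find?
            (fun i => decide (PySem.List.pyGetD ts i 0 < s))).getD 0) := by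
    rw [PySem.List.enumerate_eq_map_pyRange ts 0, List.foldl_map]
    have := pv_foldl_pick (fun i => PySem.List.pyGetD ts i 0 < s) (PySem.List.pyRange 0 (PySem.List.len ts) 1) 0
    simpa [hn_def, PySem.List.len] using this
  rw [hAfirst, hBfirst]
  set f : Int := (((PySem.List.pyRange 0 n 1).reverse.find?
      (fun i => decide (PySem.List.pyGetD ts i 0 < s))).getD 0) with hf_def
  -- bounds on f
  have hfbound : 0 ≤ f ∧ f < n := by
    rw [hf_def]
    cases hfind : (PySem.List.pyRange 0 n 1).reverse.find?
        (fun i => decide (PySem.List.pyGetD ts i 0 < s)) with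
    | none => simpa using hn
    | some v =>
        have hmem : v ∈ (PySem.List.pyRange 0 n 1).reverse := List.mem_of_find?_eq_some hfind
        rw [List.mem_reverse, PySem.List.mem_pyRange_one] at hmem
        simpa using hmem
  -- last index: A's forward break-scan from f = B's backward accumulator pass
  have hrev2 : PySem.List.pyRange (n - 1) (f - 1) (-1) = (PySem.List.pyRange f n 1).reverse := by
    have := PySem.List.pyRange_neg_one_eq_reverse (n - 1) (f - 1)
    simpa using this
  have hAlast :
      pvLoopVar (fun j => PySem.List.pyGetD ts j 0 > e) (PySem.List.pyRange f n 1) 0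
        = (((PySem.List.pyRange f n 1).find?
            (fun j => decide (PySem.List.pyGetD ts j 0 > e))).getD (n - 1)) := by
    apply pv_loopVar_eq
    exact pv_getLast?_pyRange_one f n hfbound.2
  have hBlast :
      (PySem.List.pyRange (n - 1) (f - 1) (-1)).foldl
          (fun acc j => if PySem.List.pyGetD ts j 0 > e then j else acc) (n - 1)
        = (((PySem.List.pyRange f n 1).find?
            (fun j => decide (PySem.List.pyGetD ts j 0 > e))).getD (n - 1)) := by
    rw [hrev2]
    have := pv_foldl_pick (fun j => PySem.List.pyGetD ts j 0 > e)
      ((PySem.List.pyRange f n 1).reverse) (n - 1)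
    simpa using this
  rw [hAlast, hBlast]

-- ===== VERDICT (by name: the statement is the Claim_ definition above) =====
theorem find_first_and_last_event_bags_indices_py_spec : Claim_equal_find_first_and_last_event_bags_indices_py := by
  intro ts s e _ hpre
  unfold Spec_find_first_and_last_event_bags_indices_py
  exact pv_main_eq ts s e hpre

def find_first_and_last_event_bags_indices_py_raises : Claim_raises_find_first_and_last_event_bags_indices_py := by
  unfold Claim_raises_find_first_and_last_event_bags_indices_py
  exact ⟨fun ts s e _ hr hpre => hpre hr, by decide⟩
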